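-- pv_equiv track=rewrite | github.com/mandakan/bodn-esp32 | firmware/bodn/web.py | _check_pin
-- ===== SOURCE A (Python) =====
-- def _check_pin(headers, settings):
--     """Check if request has valid PIN cookie. Returns True if OK or no PIN set."""
--     pin = settings.get("ui_pin", "")
--     if not pin:
--         return True
--     cookie = headers.get("cookie", "")
--     # Look for bodn_pin=XXXX in cookie header
--     for part in cookie.split(";"):
--         part = part.strip()
--         if part.startswith("bodn_pin="):
--             return part.split("=", 1)[1] == pin
--     return False
-- ===== SOURCE B (Python) =====
-- def _check_pin(headers, settings):
--     pin = settings.get("ui_pin", "")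
--     if not pin:
--         return True
--     cookies = {}
--     for part in headers.get("cookie", "").split(";"):
--         name, sep, value = part.strip().partition("=")
--         if sep:
--             cookies.setdefault(name, value)
--     return cookies.get("bodn_pin") == pin
-- ===== Notes on version B (the rewrite author's own statement) =====
-- stated objective: idiomatic
-- what changed: B parses the whole cookie header once into a name->value dict (strip + partition on the first '=', setdefault keeping the first occurrence) and answers with a single dict lookup, instead of A's prefix-scanning loop with an early return.
import Mathlib
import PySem

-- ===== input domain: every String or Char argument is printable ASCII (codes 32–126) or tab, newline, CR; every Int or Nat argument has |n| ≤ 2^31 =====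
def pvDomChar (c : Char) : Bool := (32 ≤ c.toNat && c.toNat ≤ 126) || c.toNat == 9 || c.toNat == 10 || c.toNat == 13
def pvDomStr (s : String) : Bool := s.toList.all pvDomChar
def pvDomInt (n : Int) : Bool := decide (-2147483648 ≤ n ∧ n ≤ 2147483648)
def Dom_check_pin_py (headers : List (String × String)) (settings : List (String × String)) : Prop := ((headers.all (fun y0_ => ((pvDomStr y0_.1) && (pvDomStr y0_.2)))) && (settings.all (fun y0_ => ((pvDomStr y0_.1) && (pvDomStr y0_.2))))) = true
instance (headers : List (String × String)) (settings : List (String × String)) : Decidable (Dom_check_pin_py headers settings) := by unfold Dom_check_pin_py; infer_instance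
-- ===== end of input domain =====

-- B parses the cookie header once into a name→value dict (strip + partition at the first '=', setdefault keeping the first
-- occurrence) and answers with a single lookup, instead of A's prefix-scanning loop with an early return; idiomatic, same cost.

-- ===== PORT A =====
-- shared port of Python's dict.get(k, default) on an association list (first match)
def pvLookup (xs : List (String × String)) (k d : String) : String :=
  (xs.lookup k).getD d

-- A's 'for part in cookie.split(";")' loop with its early return
def pvLoopA : List (List Char) → List Char → Bool
  | [], _ => false
  | p :: rest, pin =>
    let part := PySem.Chars.strip p
    if PySem.Chars.startswith part "bodn_pin=".toList then
      -- part.split("=", 1)[1] == pin  (index 1 exists: the part starts with "bodn_pin=")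
      PySem.List.pyGetD (PySem.Chars.splitOnMax part ['='] 1) 1 [] == pin
    else pvLoopA rest pin

def check_pin_py (headers : List (String × String)) (settings : List (String × String)) : Bool :=
  let pin := pvLookup settings "ui_pin" ""
  if pin == "" then true
  else pvLoopA (PySem.Chars.splitOn (pvLookup headers "cookie" "").toList [';']) pin.toList

-- ===== PORT B =====
-- B's str.partition("="), ported by hand over List Char (exact: before the first '=', whether '=' occurs, the rest after it)
def pvPartEq (cs : List Char) : List Char × Bool × List Char :=
  let name := cs.takeWhile (fun c => c != '=')
  if name.length < cs.length then (name, true, cs.drop (name.length + 1))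
  else (cs, false, [])

-- B's loop body: store name → value on the first occurrence of each name (setdefault)
def pvStepB (d : PySem.Dict (List Char) (List Char)) (p : List Char) : PySem.Dict (List Char) (List Char) :=
  let r := pvPartEq (PySem.Chars.strip p)
  if r.2.1 then d.setdefault r.1 r.2.2 else d

def check_pin_py_alt (headers : List (String × String)) (settings : List (String × String)) : Bool :=
  let pin := pvLookup settings "ui_pin" ""
  if pin == "" then true
  else
    let cookies := (PySem.Chars.splitOn (pvLookup headers "cookie" "").toList [';']).foldl pvStepB PySem.Dict.empty
    cookies.get? "bodn_pin".toList == some pin.toList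

-- ===== PRECONDITION & SPEC =====
def Spec_check_pin_py (headers : List (String × String)) (settings : List (String × String)) (out : Bool) : Prop := out = check_pin_py_alt headers settings
instance (headers : List (String × String)) (settings : List (String × String)) (out : Bool) : Decidable (Spec_check_pin_py headers settings out) := by unfold Spec_check_pin_py; infer_instance

-- ===== CLAIM (what is proved, stated in full; the proofs are below) =====
def Claim_equal_check_pin_py : Prop := ∀ (headers : List (String × String)) (settings : List (String × String)), Dom_check_pin_py headers settings → Spec_check_pin_py headers settings (check_pin_py headers settings)

-- ===== LEMMAS AND PROOFS =====

-- split(sep, maxsplit).go with the budget exhausted: the rest is one last piece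
lemma go_budget_zero (l cur : List Char) (acc : List (List Char)) (fuel : Nat) (h : 0 < fuel) :
    PySem.Chars.splitOnMax.go ['='] fuel 0 l cur acc = ((cur.reverse ++ l) :: acc).reverse := by
  cases fuel with
  | zero => omega
  | succ f =>
    cases l with
    | nil => rw [PySem.Chars.splitOnMax.go.eq_def]; simp
    | cons c rest => rw [PySem.Chars.splitOnMax.go.eq_def]; simp

-- split("=", 1).go characterised: it is partition at the first '='
lemma go_one_partition (l : List Char) : ∀ (cur : List Char) (acc : List (List Char)) (fuel : Nat),
    l.length < fuel →
    PySem.Chars.splitOnMax.go ['='] fuel 1 l cur acc =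
      if '=' ∈ l then
        acc.reverse ++ [cur.reverse ++ l.takeWhile (fun c => c != '='),
                        l.drop ((l.takeWhile (fun c => c != '=')).length + 1)]
      else acc.reverse ++ [cur.reverse ++ l] := by
  induction l with
  | nil =>
    intro cur acc fuel hf
    cases fuel with
    | zero => omega
    | succ f => rw [PySem.Chars.splitOnMax.go.eq_def]; simp
  | cons c rest ih =>
    intro cur acc fuel hf
    cases fuel with
    | zero => simp at hf
    | succ f =>
      rw [PySem.Chars.splitOnMax.go.eq_def]
      simp only [List.isPrefixOf, Bool.and_true]
      by_cases hc : c = '='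
      · subst hc
        simp only [if_neg (by omega : ¬ (1 = 0))]
        rw [if_pos (by simp)]
        rw [go_budget_zero _ _ _ f (by simp at hf; omega)]
        simp [List.drop]
      · rw [if_neg (by omega : ¬ (1 = 0)), if_neg (by simp; exact fun h => hc h.symm)]
        rw [ih (c :: cur) acc f (by simp at hf; omega)]
        by_cases hm : '=' ∈ rest
        · rw [if_pos hm, if_pos (by simp [hm])]
          simp [hc]
        · rw [if_neg hm, if_neg (by simp [hm]; exact fun h => hc h.symm)]
          simp
-- split("=", 1) itself, as B's partition
lemma splitEq1 (cs : List Char) :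
    PySem.Chars.splitOnMax cs ['='] 1 =
      if '=' ∈ cs then
        [cs.takeWhile (fun c => c != '='), cs.drop ((cs.takeWhile (fun c => c != '=')).length + 1)]
      else [cs] := by
  rw [PySem.Chars.splitOnMax]
  rw [if_neg (by omega : ¬ ((1:Int) < 0))]
  have : ((1:Int)).toNat = 1 := rfl
  rw [this, go_one_partition cs [] [] (cs.length + 1) (by omega)]
  by_cases hm : '=' ∈ cs <;> simp [hm]

-- the two literals as explicit character lists
lemma keyChars : "bodn_pin".toList = ['b','o','d','n','_','p','i','n'] := by decide
lemma pfxChars : "bodn_pin=".toList = ['b','o','d','n','_','p','i','n','='] := by decide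

-- A's prefix test agrees with B's partition result
lemma start_iff (part : List Char) :
    PySem.Chars.startswith part "bodn_pin=".toList = true ↔
      (part.takeWhile (fun c => c != '=') = "bodn_pin".toList ∧
       ("bodn_pin".toList).length < part.length) := by
  rw [PySem.Chars.startswith_iff]
  constructor
  · rintro ⟨t, ht⟩
    subst ht
    rw [keyChars, pfxChars]
    constructor
    · simp
    · simp
  · rintro ⟨hname, hlen⟩
    have hsplit := List.takeWhile_append_dropWhile (p := fun c => c != '=') (l := part)
    have hne : part.dropWhile (fun c => c != '=') ≠ [] := by
      intro hnil
      rw [hnil, List.append_nil, hname] at hsplit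
      rw [← hsplit] at hlen
      omega
    rcases List.exists_cons_of_ne_nil hne with ⟨d0, t0, hdt⟩
    have hhead := List.head_dropWhile_not (fun c => c != '=') hne
    have hd0 : d0 = '=' := by
      simp only [hdt, List.head_cons] at hhead
      simpa using hhead
    refine ⟨t0, ?_⟩
    rw [← hsplit, hname, hdt, hd0, keyChars, pfxChars]
    rfl

-- once the dict holds a value for "bodn_pin", setdefault never changes it
lemma fold_keeps_found (v : List Char) : ∀ (parts : List (List Char)) (d : PySem.Dict (List Char) (List Char)),
    d.get? "bodn_pin".toList = some v →
    (parts.foldl pvStepB d).get? "bodn_pin".toList = some v := by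
  intro parts
  induction parts with
  | nil => intro d h; simpa using h
  | cons p rest ih =>
    intro d h
    rw [List.foldl_cons]
    apply ih
    unfold pvStepB
    by_cases hs : (pvPartEq (PySem.Chars.strip p)).2.1 = true
    · rw [if_pos hs]
      by_cases hk : "bodn_pin".toList = (pvPartEq (PySem.Chars.strip p)).1
      · rw [hk, PySem.Dict.get?_setdefault_self, ← hk, h]; rfl
      · rw [PySem.Dict.get?_setdefault_of_ne _ _ hk, h]
    · rw [if_neg hs]; exact h

-- the heart: B's fold-then-lookup equals A's scanning loop, for any dict not yet holding "bodn_pin"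
lemma fold_eq_loop (pin : List Char) : ∀ (parts : List (List Char)) (d : PySem.Dict (List Char) (List Char)),
    d.get? "bodn_pin".toList = none →
    ((parts.foldl pvStepB d).get? "bodn_pin".toList == some pin) = pvLoopA parts pin := by
  intro parts
  induction parts with
  | nil =>
    intro d h
    rw [List.foldl_nil, h]
    rfl
  | cons p rest ih =>
    intro d h
    rw [List.foldl_cons]
    unfold pvLoopA
    by_cases hs : PySem.Chars.startswith (PySem.Chars.strip p) "bodn_pin=".toList = true
    · rw [if_pos hs]
      obtain ⟨hname, hlen⟩ := (start_iff _).mp hs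
      set part := PySem.Chars.strip p with hpart
      have hmem : '=' ∈ part := by
        rcases (PySem.Chars.startswith_iff part _).mp hs with ⟨t, ht⟩
        rw [← ht, pfxChars]; simp
      have hsb : pvStepB d p = d.setdefault ("bodn_pin".toList) (part.drop (("bodn_pin".toList).length + 1)) := by
        unfold pvStepB pvPartEq
        rw [← hpart, hname]
        have h8 : 8 < part.length := by rw [keyChars] at hlen; simpa using hlen
        simp [h8]
      have hval : (pvStepB d p).get? "bodn_pin".toList
          = some (part.drop (("bodn_pin".toList).length + 1)) := by
        rw [hsb, PySem.Dict.get?_setdefault_self, h]; rfl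
      rw [fold_keeps_found _ rest _ hval]
      rw [splitEq1, if_pos hmem, hname]
      rw [PySem.List.pyGetD_ofNat']
      simp [List.getD]
    · rw [if_neg hs]
      apply ih
      unfold pvStepB
      by_cases hp : (pvPartEq (PySem.Chars.strip p)).2.1 = true
      · rw [if_pos hp]
        have hk : "bodn_pin".toList ≠ (pvPartEq (PySem.Chars.strip p)).1 := by
          intro hkeq
          apply hs
          rw [start_iff]
          have hplen : ((PySem.Chars.strip p).takeWhile (fun c => c != '=')).length < (PySem.Chars.strip p).length := by
            unfold pvPartEq at hp
            by_cases hL : ((PySem.Chars.strip p).takeWhile (fun c => c != '=')).length < (PySem.Chars.strip p).length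
            · exact hL
            · simp only [if_neg hL] at hp; simp at hp
          have hnm : (pvPartEq (PySem.Chars.strip p)).1 = (PySem.Chars.strip p).takeWhile (fun c => c != '=') := by
            unfold pvPartEq
            simp only [if_pos hplen]
          rw [hnm] at hkeq
          exact ⟨hkeq.symm, by rw [← hkeq] at hplen; simpa using hplen⟩
        rw [PySem.Dict.get?_setdefault_of_ne _ _ hk]
        exact h
      · rw [if_neg hp]; exact h

-- ===== VERDICT (by name: the statement is the Claim_ definition above) =====
theorem check_pin_py_spec : Claim_equal_check_pin_py := by
  intro headers settings _
  unfold Spec_check_pin_py check_pin_py check_pin_py_alt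
  by_cases hpin : pvLookup settings "ui_pin" "" == ""
  · simp [hpin]
  · simp only [Bool.not_eq_true] at hpin
    rw [if_neg (by simp [hpin]), if_neg (by simp [hpin])]
    exact (fold_eq_loop _ _ _ (PySem.Dict.get?_empty _)).symm
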